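-- pv_equiv track=rewrite | github.com/medved-cz/aoc2021 | day-13/day-13.py | foldpaper
-- ===== SOURCE A (Python) =====
-- def formatpaper(x, y):
--     paper = []
--     for i in range(y):
--         paper.append([])
--         for j in range(x):
--             paper[i].append(0)
--     return(paper)
--
-- def foldpaper(paper, fold):
--     if fold[0] == 'y':
--         x = len(paper[0])
--         y = fold[1]
--         papernew = formatpaper(x, y)
--         for i in range(y):
--             for j in range(x):
--                 papernew[i][j] = paper[i][j] + paper[-1 * i - 1][j]
--     if fold[0] == 'x':
--         x = fold[1]
--         y = len(paper)
--         papernew = formatpaper(x, y)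
--         for i in range(y):
--             for j in range(x):
--                 papernew[i][j] = paper[i][j] + paper[i][-1 * j - 1]
--     return(papernew)
-- ===== SOURCE B (Python) =====
-- def _foldy(g, fy):
--     return [[g[i][j] + g[-i - 1][j] for j in range(len(g[0]))]
--             for i in range(fy)]
--
-- def foldpaper(paper, fold):
--     axis, n = fold
--     if axis == 'y':
--         return _foldy(paper, n)
--     if axis == 'x':
--         cols = [list(c) for c in zip(*paper)]
--         return [list(r) for r in zip(*_foldy(cols, n))]
-- ===== Notes on version B (the rewrite author's own statement) =====
-- stated objective: simpler
-- what changed: A duplicates the fold logic per axis, allocating a zero matrix and mutating it with nested index loops; B has one y-fold core (a comprehension summing each row with its mirror row) and handles an x-fold by transposing, applying the same core, and transposing back; Pre_ additionally excludes the empty paper and ragged papers on x-folds, where A's per-row mirror index is an accident of raggedness and B's transpose view cannot (and should not) reproduce it.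
-- intended difference: On an x-fold at a nonpositive fold line with a nonempty paper, A returns one empty row per paper row (manufactured by its zero-matrix allocation), while B returns the empty grid; nothing lies left of a nonpositive fold line, so the empty result is the intended one. — e.g. on foldpaper([[1]], ("x", 0)): A returns [[]], B returns []
-- outside the precondition, e.g. on foldpaper([], ('x', 1)): A returns [], B raises IndexError; on foldpaper([[1, 2], [3]], ('x', 1)): A returns [[3], [6]], B returns [[2], [6]]
import Mathlib
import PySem

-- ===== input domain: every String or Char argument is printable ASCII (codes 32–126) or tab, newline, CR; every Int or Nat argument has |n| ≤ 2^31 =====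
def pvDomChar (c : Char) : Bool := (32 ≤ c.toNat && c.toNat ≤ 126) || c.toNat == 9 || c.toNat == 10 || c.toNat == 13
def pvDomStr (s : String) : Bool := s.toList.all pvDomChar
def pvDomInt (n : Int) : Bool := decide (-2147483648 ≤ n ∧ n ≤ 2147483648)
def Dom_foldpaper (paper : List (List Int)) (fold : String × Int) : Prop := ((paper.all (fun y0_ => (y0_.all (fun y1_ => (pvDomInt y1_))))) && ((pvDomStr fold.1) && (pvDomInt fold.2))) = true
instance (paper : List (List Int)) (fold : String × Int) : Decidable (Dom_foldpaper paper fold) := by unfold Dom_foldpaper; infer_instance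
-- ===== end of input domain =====

-- B replaces A's two mutating per-axis loop nests by a single y-fold core plus
-- transpose for the x axis; equality of RETURN values is proved (neither mutates).

-- ===== PORT A =====
def formatpaper (x y : Int) : List (List Int) :=
  (PySem.List.pyRange 0 y 1).foldl
    (fun paper i =>
      let paper := paper ++ [([] : List Int)]
      (PySem.List.pyRange 0 x 1).foldl
        (fun p _j => p.modify i.toNat (fun row => row ++ [(0 : Int)])) paper)
    []

def foldpaper (paper : List (List Int)) (fold : String × Int) : List (List Int) :=
  if fold.1 == "y" then
    let x : Int := (((PySem.List.pyGet? paper 0).getD []).length : Int)  -- len(paper[0]); IndexError on empty paper excluded by Pre_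
    let y : Int := fold.2
    let pn := formatpaper x y
    (PySem.List.pyRange 0 y 1).foldl
      (fun pn i =>
        (PySem.List.pyRange 0 x 1).foldl
          (fun pn j =>
            let v : Int := PySem.List.pyGetD (PySem.List.pyGetD paper i []) j 0
                         + PySem.List.pyGetD (PySem.List.pyGetD paper (-1 * i - 1) []) j 0
            pn.modify i.toNat (fun row => row.modify j.toNat (fun _ => v)))
          pn)
      pn
  else if fold.1 == "x" then
    let x : Int := fold.2
    let y : Int := (paper.length : Int)
    let pn := formatpaper x y
    (PySem.List.pyRange 0 y 1).foldl
      (fun pn i =>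
        (PySem.List.pyRange 0 x 1).foldl
          (fun pn j =>
            let v : Int := PySem.List.pyGetD (PySem.List.pyGetD paper i []) j 0
                         + PySem.List.pyGetD (PySem.List.pyGetD paper i []) (-1 * j - 1) 0
            pn.modify i.toNat (fun row => row.modify j.toNat (fun _ => v)))
          pn)
      pn
  else []  -- Python: UnboundLocalError; excluded by Pre_

-- ===== PORT B =====
-- _foldy(g, fy) = [[g[i][j] + g[-i-1][j] for j in range(len(g[0]))] for i in range(fy)]
-- indexing is in range on Pre_ inputs, so g[..] is ported as pyGetD
def pvFoldy (g : List (List Int)) (fy : Int) : List (List Int) :=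
  (PySem.List.pyRange 0 fy 1).map (fun i =>
    (PySem.List.pyRange 0 ((((PySem.List.pyGet? g 0).getD []).length : Nat) : Int) 1).map (fun j =>
      PySem.List.pyGetD (PySem.List.pyGetD g i []) j 0
      + PySem.List.pyGetD (PySem.List.pyGetD g (-1 * i - 1) []) j 0))

-- hand port of zip(*g) (exact: one column per index below the shortest row; [] for g = [])
def pvTranspose (g : List (List Int)) : List (List Int) :=
  match g with
  | [] => []
  | r :: rs =>
      let m := rs.foldl (fun m row => min m row.length) r.length
      (List.range m).map (fun j => (r :: rs).map (fun row => row.getD j 0))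

def foldpaper_alt (paper : List (List Int)) (fold : String × Int) : List (List Int) :=
  if fold.1 == "y" then pvFoldy paper fold.2
  else if fold.1 == "x" then pvTranspose (pvFoldy (pvTranspose paper) fold.2)
  else []  -- Python B returns None here; excluded by Pre_

-- ===== PRECONDITION & SPEC =====
-- Pre_ excludes inputs where A raises: an axis other than 'y'/'x' (UnboundLocalError),
-- a y-fold of an empty paper or with an out-of-range fold line / mirror row (IndexError),
-- and an x-fold with some row shorter than the fold line (IndexError).  It also excludes
-- two kinds of x-fold inputs on which A returns: the empty paper (B's transpose core has
-- no column to fold and raises) and ragged papers (A's per-row mirror index there is an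
-- accident of raggedness that a transpose view of the grid cannot reproduce).
def Pre_foldpaper (paper : List (List Int)) (fold : String × Int) : Prop :=
  (fold.1 = "y" ∧ paper ≠ [] ∧
    (paper.headI.length = 0 ∨
      (fold.2 ≤ (paper.length : Int) ∧
        ∀ i < paper.length, (i : Int) < fold.2 →
          paper.headI.length ≤ (paper.getD i []).length ∧
          paper.headI.length ≤ (paper.getD (paper.length - 1 - i) []).length)))
  ∨ (fold.1 = "x" ∧ paper ≠ [] ∧ (∀ r ∈ paper, r.length = paper.headI.length) ∧
      fold.2 ≤ (paper.headI.length : Int))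
instance (paper : List (List Int)) (fold : String × Int) : Decidable (Pre_foldpaper paper fold) := by
  unfold Pre_foldpaper; infer_instance

def pvWitness_foldpaper : List (List Int) × (String × Int) := ([[1, 2], [3, 4]], ("y", 1))

-- On an x-fold at a nonpositive fold line with a nonempty paper, A returns one empty row
-- per paper row (manufactured by its zero-matrix allocation), while B returns the empty
-- grid; nothing lies left of a nonpositive fold line, so the empty result is intended.
def D_foldpaper (paper : List (List Int)) (fold : String × Int) : Prop :=
  fold.1 = "x" ∧ fold.2 ≤ 0 ∧ paper ≠ []
instance (paper : List (List Int)) (fold : String × Int) : Decidable (D_foldpaper paper fold) := by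
  unfold D_foldpaper; infer_instance

def Spec_foldpaper (paper : List (List Int)) (fold : String × Int) (out : List (List Int)) : Prop :=
  ¬ D_foldpaper paper fold → out = foldpaper_alt paper fold
instance (paper : List (List Int)) (fold : String × Int) (out : List (List Int)) : Decidable (Spec_foldpaper paper fold out) := by
  unfold Spec_foldpaper; infer_instance

def pvDiffWitness_foldpaper : List (List Int) × (String × Int) := ([[1]], ("x", 0))
def pvDiffWitnessOut_foldpaper : (List (List Int)) × (List (List Int)) := ([[]], [])

-- ===== CLAIM (what is proved, stated in full; the proofs are below) =====
def Claim_unchanged_foldpaper : Prop := ∀ (paper : List (List Int)) (fold : String × Int), Dom_foldpaper paper fold → Pre_foldpaper paper fold → Spec_foldpaper paper fold (foldpaper paper fold)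
def Claim_changed_foldpaper : Prop := Dom_foldpaper (pvDiffWitness_foldpaper.1) (pvDiffWitness_foldpaper.2) ∧ Pre_foldpaper (pvDiffWitness_foldpaper.1) (pvDiffWitness_foldpaper.2) ∧ D_foldpaper (pvDiffWitness_foldpaper.1) (pvDiffWitness_foldpaper.2) ∧ foldpaper (pvDiffWitness_foldpaper.1) (pvDiffWitness_foldpaper.2) = pvDiffWitnessOut_foldpaper.1 ∧ foldpaper_alt (pvDiffWitness_foldpaper.1) (pvDiffWitness_foldpaper.2) = pvDiffWitnessOut_foldpaper.2 ∧ pvDiffWitnessOut_foldpaper.1 ≠ pvDiffWitnessOut_foldpaper.2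
def Claim_exact_foldpaper : Prop := ∀ (paper : List (List Int)) (fold : String × Int), Dom_foldpaper paper fold → Pre_foldpaper paper fold → D_foldpaper paper fold → foldpaper paper fold ≠ foldpaper_alt paper fold

-- ===== LEMMAS AND PROOFS =====

theorem pv_range_cast (n : Int) :
    PySem.List.pyRange 0 n 1 = (List.range n.toNat).map (fun (k : Nat) => (k : Int)) := by
  rw [PySem.List.pyRange_one]; simp

theorem pv_modify_append_cons {α : Type} (s : List α) (r : α) (t : List α) (f : α → α) :
    (s ++ r :: t).modify s.length f = s ++ f r :: t := by
  induction s with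
  | nil => simp [List.modify]
  | cons a s ih => simpa [List.modify] using ih

theorem pv_inner_format (l : List Int) (s : List (List Int)) (r : List Int) :
    l.foldl (fun p _ => p.modify s.length (fun row => row ++ [(0 : Int)])) (s ++ [r])
      = s ++ [r ++ List.replicate l.length 0] := by
  induction l generalizing r with
  | nil => simp
  | cons a l ih =>
      rw [List.foldl_cons, show (s ++ [r] : List (List Int)) = s ++ r :: [] from rfl,
        pv_modify_append_cons, ih]
      simp [List.replicate_succ]

theorem pv_foldl_modify_const {α β : Type} (l : List β) (k : Nat) (g : β → α → α) (p0 : List α) :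
    l.foldl (fun p j => p.modify k (g j)) p0
      = p0.modify k (fun row => l.foldl (fun r j => g j r) row) := by
  induction l generalizing p0 with
  | nil => exact (List.modify_id k p0).symm
  | cons a l ih => rw [List.foldl_cons, ih, List.modify_modify_eq]; rfl

theorem pv_row_setall (m : Nat) (v : Int → Int) (row : List Int) (hm : m ≤ row.length) :
    ((List.range m).map (fun (k : Nat) => (k : Int))).foldl
        (fun r j => r.modify j.toNat (fun _ => v j)) row
      = (List.range m).map (fun (j : Nat) => v (j : Int)) ++ row.drop m := by
  induction m with
  | zero => simp
  | succ k ih =>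
      rw [List.range_succ, List.map_append, List.foldl_append, ih (Nat.le_of_succ_le hm)]
      have hk : k < row.length := hm
      rw [List.map_singleton, List.foldl_cons, List.foldl_nil,
        List.drop_eq_getElem_cons hk]
      have h1 : ((k : Int)).toNat = ((List.range k).map (fun (j:Nat) => v (j:Int))).length := by simp
      rw [h1, pv_modify_append_cons]
      simp

theorem pv_formatpaper_eq (x y : Int) :
    formatpaper x y = List.replicate y.toNat (List.replicate x.toNat (0 : Int)) := by
  unfold formatpaper
  rw [pv_range_cast y]
  induction y.toNat with
  | zero => simp
  | succ m ih =>
      rw [List.range_succ, List.map_append, List.foldl_append, ih,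
        List.map_singleton, List.foldl_cons, List.foldl_nil]
      have h1 : ((m : Int)).toNat = (List.replicate m (List.replicate x.toNat (0:Int))).length := by simp
      rw [h1, pv_inner_format]
      simp [List.replicate_succ', PySem.List.length_pyRange_one]

theorem pv_fill (x : Int) (v : Int → Int → Int) (m Y : Nat) (hm : m ≤ Y) :
    ((List.range m).map (fun (k : Nat) => (k : Int))).foldl
      (fun pn i => (PySem.List.pyRange 0 x 1).foldl
         (fun pn j => pn.modify i.toNat (fun row => row.modify j.toNat (fun _ => v i j))) pn)
      (List.replicate Y (List.replicate x.toNat (0:Int)))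
    = (List.range m).map (fun (i : Nat) => (List.range x.toNat).map (fun (j : Nat) => v (i:Int) (j:Int)))
      ++ List.replicate (Y - m) (List.replicate x.toNat (0:Int)) := by
  induction m with
  | zero => simp
  | succ k ih =>
      rw [List.range_succ, List.map_append, List.foldl_append, ih (Nat.le_of_succ_le hm),
        List.map_singleton, List.foldl_cons, List.foldl_nil]
      rw [pv_foldl_modify_const (PySem.List.pyRange 0 x 1) ((k:Int)).toNat
        (fun (j : Int) (row : List Int) => row.modify j.toNat (fun _ => v (k:Int) j))]
      have hrep : List.replicate (Y - k) (List.replicate x.toNat (0:Int))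
          = List.replicate x.toNat (0:Int) :: List.replicate (Y - (k+1)) (List.replicate x.toNat (0:Int)) := by
        rw [show Y - k = (Y - (k+1)) + 1 by omega, List.replicate_succ]
      rw [hrep]
      have h1 : ((k : Int)).toNat
          = ((List.range k).map (fun (i:Nat) => (List.range x.toNat).map (fun (j:Nat) => v (i:Int) (j:Int)))).length := by simp
      rw [h1, pv_modify_append_cons]
      rw [pv_range_cast x, pv_row_setall x.toNat (fun j => v (k:Int) j) _ (by simp)]
      simp

-- Canonical forms of A's two branches (unconditional).
theorem pv_A_y (paper : List (List Int)) (n : Int) :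
    foldpaper paper ("y", n)
      = (List.range n.toNat).map (fun (i : Nat) =>
          (List.range ((PySem.List.pyGet? paper 0).getD []).length).map (fun (j : Nat) =>
            PySem.List.pyGetD (PySem.List.pyGetD paper (i : Int) []) (j : Int) 0
            + PySem.List.pyGetD (PySem.List.pyGetD paper (-1 * (i : Int) - 1) []) (j : Int) 0)) := by
  unfold foldpaper
  rw [if_pos (by rfl)]
  simp only []
  rw [pv_formatpaper_eq, pv_range_cast n]
  have := pv_fill ((((PySem.List.pyGet? paper 0).getD []).length : Nat) : Int)
    (fun i j => PySem.List.pyGetD (PySem.List.pyGetD paper i []) j 0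
            + PySem.List.pyGetD (PySem.List.pyGetD paper (-1 * i - 1) []) j 0)
    n.toNat n.toNat le_rfl
  simpa using this

theorem pv_A_x (paper : List (List Int)) (n : Int) :
    foldpaper paper ("x", n)
      = (List.range paper.length).map (fun (i : Nat) =>
          (List.range n.toNat).map (fun (j : Nat) =>
            PySem.List.pyGetD (PySem.List.pyGetD paper (i : Int) []) (j : Int) 0
            + PySem.List.pyGetD (PySem.List.pyGetD paper (i : Int) []) (-1 * (j : Int) - 1) 0)) := by
  unfold foldpaper
  rw [if_neg (by simp), if_pos (by rfl)]
  simp only []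
  rw [pv_formatpaper_eq, pv_range_cast ((paper.length : Nat) : Int)]
  have := pv_fill n
    (fun i j => PySem.List.pyGetD (PySem.List.pyGetD paper i []) j 0
            + PySem.List.pyGetD (PySem.List.pyGetD paper i []) (-1 * j - 1) 0)
    paper.length paper.length le_rfl
  simpa using this

-- Canonical form of B's core (unconditional): pvFoldy in terms of List.range.
theorem pv_B_foldy (g : List (List Int)) (n : Int) :
    pvFoldy g n
      = (List.range n.toNat).map (fun (i : Nat) =>
          (List.range ((PySem.List.pyGet? g 0).getD []).length).map (fun (j : Nat) =>
            PySem.List.pyGetD (PySem.List.pyGetD g (i : Int) []) (j : Int) 0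
            + PySem.List.pyGetD (PySem.List.pyGetD g (-1 * (i : Int) - 1) []) (j : Int) 0)) := by
  unfold pvFoldy
  rw [pv_range_cast n, pv_range_cast ((((PySem.List.pyGet? g 0).getD []).length : Nat) : Int)]
  simp [List.map_map, Function.comp]

theorem pv_head_eq (paper : List (List Int)) :
    (PySem.List.pyGet? paper 0).getD [] = paper.headI := by
  cases paper with
  | nil => simp [PySem.List.pyGet?, PySem.List.pyIdx?, List.headI, (show (default : List Int) = [] from rfl)]
  | cons a l => simp


theorem pv_foldl_min_const (l : List (List Int)) (w : Nat) (h : ∀ r ∈ l, r.length = w) :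
    l.foldl (fun m row => min m row.length) w = w := by
  induction l with
  | nil => rfl
  | cons a l ih =>
      rw [List.foldl_cons, h a (by simp), min_self]
      exact ih (fun r hr => h r (by simp [hr]))

-- transpose of a nonempty rectangular grid of width w
theorem pv_transpose_rect (paper : List (List Int)) (hne : paper ≠ [])
    (hrect : ∀ r ∈ paper, r.length = paper.headI.length) :
    pvTranspose paper
      = (List.range paper.headI.length).map (fun j => paper.map (fun row => row.getD j 0)) := by
  cases paper with
  | nil => exact absurd rfl hne
  | cons r rs =>
      have hhead : (r :: rs).headI = r := rfl
      unfold pvTranspose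
      simp only [hhead] at hrect ⊢
      rw [show r.length = (r :: rs).headI.length from rfl] at hrect ⊢
      rw [pv_foldl_min_const rs _ (fun a ha => hrect a (by simp [ha]))]

theorem pv_toNat_le {n : Int} {L : Nat} (h : n ≤ (L : Int)) : n.toNat ≤ L := by omega

-- reading a column of the transposed grid
theorem pv_getD_cols (paper : List (List Int)) (w k : Nat) (d : List Int) (hk : k < w) :
    ((List.range w).map (fun j => paper.map (fun row => row.getD j 0))).getD k d
      = paper.map (fun row => row.getD k 0) := by
  rw [List.getD_eq_getElem _ d (by simpa using hk)]
  simp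

-- B's core applied to the column grid, closed form
theorem pv_foldy_T (paper : List (List Int)) (n : Int) (w : Nat)
    (hw1 : 1 ≤ w) (hn : n.toNat ≤ w) (_hL : 1 ≤ paper.length) :
    pvFoldy ((List.range w).map (fun j => paper.map (fun row => row.getD j 0))) n
      = (List.range n.toNat).map (fun i =>
          (List.range paper.length).map (fun j =>
            (paper.getD j []).getD i 0 + (paper.getD j []).getD (w - 1 - i) 0)) := by
  rw [pv_B_foldy]
  have hhead : ((PySem.List.pyGet? ((List.range w).map
      (fun j => paper.map (fun row => row.getD j 0))) 0).getD []).length = paper.length := by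
    rw [pv_head_eq]
    obtain ⟨w', hw'⟩ : ∃ w', w = w' + 1 := ⟨w - 1, by omega⟩
    subst hw'
    rw [List.range_succ_eq_map]
    simp [List.headI]
  rw [hhead]
  apply List.map_congr_left
  intro i hi
  have hi' : i < n.toNat := List.mem_range.mp hi
  have h1 : PySem.List.pyGetD ((List.range w).map
        (fun j => paper.map (fun row => row.getD j 0))) (i : Int) []
      = paper.map (fun row => row.getD i 0) := by
    rw [PySem.List.pyGetD_natCast]
    exact pv_getD_cols paper w i [] (by omega)
  have eneg : (-1 * (i : Int) - 1) = -(((i + 1 : Nat)) : Int) := by push_cast; ring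
  have h2 : PySem.List.pyGetD ((List.range w).map
        (fun j => paper.map (fun row => row.getD j 0))) (-1 * (i : Int) - 1) []
      = paper.map (fun row => row.getD (w - 1 - i) 0) := by
    rw [eneg, PySem.List.pyGetD_neg_natCast _ (i + 1) [] (by omega) (by simp; omega)]
    simp only [List.length_map, List.length_range, List.getElem_map, List.getElem_range]
    rw [show w - (i + 1) = w - 1 - i from by omega]
  rw [h1, h2]
  apply List.map_congr_left
  intro j hj
  have hj' : j < paper.length := List.mem_range.mp hj
  have h3 : ∀ k : Nat, PySem.List.pyGetD (paper.map (fun row => row.getD k 0)) (j : Int) 0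
      = (paper.getD j []).getD k 0 := by
    intro k
    rw [PySem.List.pyGetD_natCast,
      List.getD_eq_getElem _ 0 (by simpa using hj'), List.getElem_map,
      List.getD_eq_getElem paper [] hj']
  rw [h3, h3]

-- transposing a rectangular grid written as a double comprehension
theorem pv_transpose_grid (g : Nat → Nat → Int) (M L : Nat) (hM : 1 ≤ M) (_hL : 1 ≤ L) :
    pvTranspose ((List.range M).map (fun i => (List.range L).map (g i)))
      = (List.range L).map (fun q => (List.range M).map (fun p => g p q)) := by
  have hne : (List.range M).map (fun i => (List.range L).map (g i)) ≠ [] := by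
    simp [List.range_eq_nil]
    omega
  have hhead : ((List.range M).map (fun i => (List.range L).map (g i))).headI.length = L := by
    obtain ⟨M', hM'⟩ : ∃ M', M = M' + 1 := ⟨M - 1, by omega⟩
    subst hM'
    rw [List.range_succ_eq_map]
    simp [List.headI]
  have hrect : ∀ r ∈ (List.range M).map (fun i => (List.range L).map (g i)),
      r.length = ((List.range M).map (fun i => (List.range L).map (g i))).headI.length := by
    intro r hr
    rw [hhead]
    obtain ⟨i, _, rfl⟩ := List.mem_map.mp hr
    simp
  rw [pv_transpose_rect _ hne hrect, hhead]
  apply List.map_congr_left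
  intro q hq
  have hq' : q < L := List.mem_range.mp hq
  apply List.ext_getElem
  · simp
  · intro p h1 h2
    simp only [List.getElem_map, List.getElem_range]
    rw [List.getD_eq_getElem _ 0 (by simpa using hq')]
    simp

-- B's x-branch, closed form, under the x-side precondition with 1 ≤ n
theorem pv_B_x_closed (paper : List (List Int)) (n : Int)
    (hne : paper ≠ []) (hrect : ∀ r ∈ paper, r.length = paper.headI.length)
    (hn1 : 1 ≤ n) (hnw : n ≤ (paper.headI.length : Int)) :
    pvTranspose (pvFoldy (pvTranspose paper) n)
      = (List.range paper.length).map (fun i =>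
          (List.range n.toNat).map (fun j =>
            (paper.getD i []).getD j 0 + (paper.getD i []).getD (paper.headI.length - 1 - j) 0)) := by
  have hL : 1 ≤ paper.length := List.length_pos_iff.mpr hne
  have hnn : n.toNat ≤ paper.headI.length := pv_toNat_le hnw
  have hw1 : 1 ≤ paper.headI.length := by omega
  have hM : 1 ≤ n.toNat := by omega
  rw [pv_transpose_rect paper hne hrect,
    pv_foldy_T paper n paper.headI.length hw1 hnn hL,
    pv_transpose_grid
      (fun p q => (paper.getD q []).getD p 0 + (paper.getD q []).getD (paper.headI.length - 1 - p) 0)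
      n.toNat paper.length hM hL]

-- A's x-branch equals the same closed form under the x-side precondition
theorem pv_A_x_closed (paper : List (List Int)) (n : Int)
    (hrect : ∀ r ∈ paper, r.length = paper.headI.length)
    (hnw : n ≤ (paper.headI.length : Int)) :
    foldpaper paper ("x", n)
      = (List.range paper.length).map (fun i =>
          (List.range n.toNat).map (fun j =>
            (paper.getD i []).getD j 0 + (paper.getD i []).getD (paper.headI.length - 1 - j) 0)) := by
  have hnnw : n.toNat ≤ paper.headI.length := pv_toNat_le hnw
  rw [pv_A_x]
  apply List.map_congr_left
  intro i hi
  have hi' : i < paper.length := List.mem_range.mp hi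
  have hrow : PySem.List.pyGetD paper (i : Int) [] = paper.getD i [] := by
    rw [PySem.List.pyGetD_natCast]
  rw [hrow]
  have hrlen : (paper.getD i []).length = paper.headI.length := by
    rw [List.getD_eq_getElem paper [] hi']
    exact hrect _ (by simp)
  apply List.map_congr_left
  intro j hj
  have hj' : j < n.toNat := List.mem_range.mp hj
  have f1 : PySem.List.pyGetD (paper.getD i []) (j : Int) 0 = (paper.getD i []).getD j 0 := by
    rw [PySem.List.pyGetD_natCast]
  have eneg : (-1 * (j : Int) - 1) = -(((j + 1 : Nat)) : Int) := by push_cast; ring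
  have f2 : PySem.List.pyGetD (paper.getD i []) (-1 * (j : Int) - 1) 0
      = (paper.getD i []).getD (paper.headI.length - 1 - j) 0 := by
    rw [eneg, PySem.List.pyGetD_neg_natCast (paper.getD i []) (j + 1) 0 (by omega) (by omega)]
    rw [List.getD_eq_getElem _ 0 (by omega)]
    congr 1
    omega
  rw [f1, f2]

-- ===== VERDICT (by name: the statement is the Claim_ definition above) =====
theorem foldpaper_spec : Claim_unchanged_foldpaper := by
  intro paper fold _hdom hpre hnD
  obtain ⟨ax, n⟩ := fold
  rcases hpre with ⟨hax, _, _⟩ | ⟨hax, hne, hrect, hnw⟩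
  · -- y-fold: A's canonical form and B's core are literally the same expression
    simp only at hax
    subst hax
    rw [pv_A_y]
    unfold foldpaper_alt
    rw [if_pos (by rfl), pv_B_foldy]
  · -- x-fold
    simp only at hax
    subst hax
    have hn1 : 1 ≤ n := by
      by_contra h
      exact hnD ⟨rfl, by omega, hne⟩
    unfold foldpaper_alt
    rw [if_neg (by simp), if_pos (by rfl)]
    rw [pv_A_x_closed paper n hrect hnw, pv_B_x_closed paper n hne hrect hn1 hnw]

theorem foldpaper_changed : Claim_changed_foldpaper := by
  unfold Claim_changed_foldpaper; decide

theorem foldpaper_tight : Claim_exact_foldpaper := by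
  intro paper fold _hdom hpre hD heq
  obtain ⟨ax, n⟩ := fold
  obtain ⟨hax, hn0, hne⟩ := hD
  simp only at hax
  subst hax
  have hA : (foldpaper paper ("x", n)).length = paper.length := by
    rw [pv_A_x]; simp
  have hB : foldpaper_alt paper ("x", n) = [] := by
    unfold foldpaper_alt
    rw [if_neg (by simp), if_pos (by rfl)]
    rw [pv_B_foldy, show n.toNat = 0 by omega]
    rfl
  rw [heq, hB] at hA
  simp at hA
  exact hne (List.length_eq_zero_iff.mp hA.symm)
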